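-- pv_equiv track=rewrite | github.com/JamesFNGibbons/REG121-VESTA_FORGE | tools/pipeline.py | pick_sample_ids_per_category
-- ===== SOURCE A (Python) =====
-- from typing import Any
--
-- _CATEGORY_ALIASES: dict[str, str] = {
--     "heroes": "hero",
--     "hero": "hero",
--     "features": "feature",
--     "feature": "feature",
--     "footers": "footer",
--     "footer": "footer",
--     "social-proof": "social-proof",
--     "socialproof": "social-proof",
--     "social": "social-proof",
--     "cta": "cta",
--     "contact": "contact",
--     "navigation": "navigation",
-- }
--
-- def normalize_category(user: str) -> str:
--     k = user.strip().lower()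
--     return _CATEGORY_ALIASES.get(k, k)
--
-- def pick_sample_ids_per_category(catalogue: dict[str, dict[str, Any]]) -> dict[str, str]:
--     """One deterministic catalogue id per normalized category (for dry-run matrix)."""
--     buckets: dict[str, list[str]] = {}
--     for cid, row in catalogue.items():
--         cat = str(row.get("category") or "").strip().lower()
--         if not cat:
--             continue
--         ncat = normalize_category(cat)
--         buckets.setdefault(ncat, []).append(cid)
--     return {k: sorted(v)[0] for k, v in sorted(buckets.items()) if v}
-- ===== SOURCE B (Python) =====
-- _CATEGORY_ALIASES: dict[str, str] = {
--     "heroes": "hero",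
--     "hero": "hero",
--     "features": "feature",
--     "feature": "feature",
--     "footers": "footer",
--     "footer": "footer",
--     "social-proof": "social-proof",
--     "socialproof": "social-proof",
--     "social": "social-proof",
--     "cta": "cta",
--     "contact": "contact",
--     "navigation": "navigation",
-- }
--
-- def normalize_category(user: str) -> str:
--     k = user.strip().lower()
--     return _CATEGORY_ALIASES.get(k, k)
--
-- def pick_sample_ids_per_category(catalogue):
--     """One deterministic catalogue id per normalized category: for each category
--     (in ascending order) the minimal id -- no per-category buckets, no per-bucket sort."""
--     keyed = []
--     for cid, row in catalogue.items():
--         cat = str(row.get("category") or "").strip().lower()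
--         if cat != "":
--             keyed.append((normalize_category(cat), cid))
--     cats = sorted({k for k, _ in keyed})
--     return {c: min(cid for k, cid in keyed if k == c) for c in cats}
-- ===== Notes on version B (the rewrite author's own statement) =====
-- stated objective: alternative
-- what changed: Instead of grouping ids into per-category bucket lists and sorting each bucket to take its head, B keeps one flat (category, id) list, sorts the distinct categories, and takes min() of the ids matching each category.
import Mathlib
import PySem

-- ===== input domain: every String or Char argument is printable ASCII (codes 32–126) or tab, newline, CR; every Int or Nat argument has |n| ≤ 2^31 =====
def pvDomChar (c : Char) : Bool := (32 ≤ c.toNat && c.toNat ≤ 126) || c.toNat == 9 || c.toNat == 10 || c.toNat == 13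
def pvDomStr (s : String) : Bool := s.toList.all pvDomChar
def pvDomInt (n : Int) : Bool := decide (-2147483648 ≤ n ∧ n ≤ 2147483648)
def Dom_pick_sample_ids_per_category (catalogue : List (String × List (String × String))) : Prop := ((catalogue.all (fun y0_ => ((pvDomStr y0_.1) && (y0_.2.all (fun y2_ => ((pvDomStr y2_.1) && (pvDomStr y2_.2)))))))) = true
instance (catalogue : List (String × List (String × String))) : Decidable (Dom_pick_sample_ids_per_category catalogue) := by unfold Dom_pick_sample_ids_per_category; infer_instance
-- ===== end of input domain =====

-- B replaces A's per-category bucket lists (sorted per bucket, head taken) by a flat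
-- (category, id) list, sorted distinct categories and a min() scan per category: alternative decomposition.

-- shared module helpers (used verbatim by both Pythons)
def pvAliases : PySem.Dict String String := PySem.Dict.ofList
  [("heroes","hero"),("hero","hero"),("features","feature"),("feature","feature"),
   ("footers","footer"),("footer","footer"),("social-proof","social-proof"),
   ("socialproof","social-proof"),("social","social-proof"),("cta","cta"),
   ("contact","contact"),("navigation","navigation")]

def normalize_category (user : String) : String :=
  let k := PySem.Str.lower (PySem.Str.strip user)
  pvAliases.getD k k

-- str(row.get("category") or "").strip().lower()  (the 'or ""' and the missing-key default coincide: "" is the only falsy str)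
def pvExtract (row : List (String × String)) : String :=
  PySem.Str.lower (PySem.Str.strip ((PySem.Dict.mk row).getD "category" ""))

-- body of A's result comprehension: '{k: sorted(v)[0] … if v}' — the [] branch is the skipped empty bucket
def pvPick (acc : List (String × String)) (q : String × List String) : List (String × String) :=
  match PySem.List.sorted q.2 (fun x => x) false with
  | [] => acc
  | h :: _ => acc ++ [(q.1, h)]

-- ===== PORT A =====
def pick_sample_ids_per_category (catalogue : List (String × List (String × String))) : List (String × String) :=
  let buckets : PySem.Dict String (List String) := catalogue.foldl
    (fun b p =>
      let cat := pvExtract p.2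
      if cat = "" then b
      else b.modify (normalize_category cat) [] (· ++ [p.1]))   -- setdefault(ncat, []).append(cid)
    PySem.Dict.empty
  -- sorted(buckets.items()): keys are unique, so Python's tuple sort is the sort by key;
  -- 'if v' guard + sorted(v)[0]: the [] branch of the match is the skipped empty bucket.
  (PySem.List.sorted buckets.items (fun q => q.1) false).foldl pvPick []

-- ===== PORT B =====
def pick_sample_ids_per_category_alt (catalogue : List (String × List (String × String))) : List (String × String) :=
  let keyed : List (String × String) := catalogue.foldl
    (fun ps p =>
      let cat := pvExtract p.2
      if cat ≠ "" then ps ++ [(normalize_category cat, p.1)] else ps) []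
  let cats := PySem.List.sorted (PySem.Set.ofList (keyed.map (fun q => q.1))) (fun x => x) false
  -- min(...) over the ids of a category; every c ∈ cats occurs in keyed, so min? is some (getD "" unreachable)
  cats.map (fun c =>
    (c, (PySem.List.min? ((keyed.filter (fun q => q.1 == c)).map (fun q => q.2)) (fun x => x)).getD ""))

-- ===== PRECONDITION & SPEC =====
def Spec_pick_sample_ids_per_category (catalogue : List (String × List (String × String))) (out : List (String × String)) : Prop := out = pick_sample_ids_per_category_alt catalogue
instance (catalogue : List (String × List (String × String))) (out : List (String × String)) : Decidable (Spec_pick_sample_ids_per_category catalogue out) := by unfold Spec_pick_sample_ids_per_category; infer_instance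

-- ===== CLAIM (what is proved, stated in full; the proofs are below) =====
def Claim_equal_pick_sample_ids_per_category : Prop := ∀ (catalogue : List (String × List (String × String))), Dom_pick_sample_ids_per_category catalogue → Spec_pick_sample_ids_per_category catalogue (pick_sample_ids_per_category catalogue)

-- ===== LEMMAS AND PROOFS =====

-- the stream of kept (normalized category, id) pairs, in catalogue order
def pvKept (l : List (String × List (String × String))) : List (String × String) :=
  (l.filter (fun x => decide (pvExtract x.2 ≠ ""))).map (fun x => (normalize_category (pvExtract x.2), x.1))

lemma pvKeyed_eq (l : List (String × List (String × String))) :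
    l.foldl (fun ps p =>
      let cat := pvExtract p.2
      if cat ≠ "" then ps ++ [(normalize_category cat, p.1)] else ps) [] = pvKept l := by
  have := PySem.List.foldl_append_ite (l := l) (acc := ([] : List (String × String)))
      (p := fun x => pvExtract x.2 ≠ "")
      (f := fun x => (normalize_category (pvExtract x.2), x.1))
  simpa [pvKept] using this

lemma pvBuckets_eq (l : List (String × List (String × String))) (b : PySem.Dict String (List String)) :
    l.foldl (fun b p =>
      let cat := pvExtract p.2
      if cat = "" then b
      else b.modify (normalize_category cat) [] (· ++ [p.1])) b
    = (pvKept l).foldl (fun d q => d.modify q.1 [] (· ++ [q.2])) b := by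
  induction l generalizing b with
  | nil => rfl
  | cons a t ih =>
    by_cases h : pvExtract a.2 = ""
    · simp [pvKept, h, ih]
    · simp [pvKept, h, ih]

-- the grouping dict built from the kept stream
def pvD (es : List (String × String)) : PySem.Dict String (List String) :=
  es.foldl (fun d q => d.modify q.1 [] (· ++ [q.2])) PySem.Dict.empty

lemma pvGrp (es : List (String × String)) (c : String) :
    (pvD es).getD c [] = (es.filter (fun q => q.1 == c)).map (fun q => q.2) := by
  have := PySem.Dict.getD_foldl_modify_append (l := es) (d := (PySem.Dict.empty : PySem.Dict String (List String))) (c := c)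
  simpa [pvD] using this

lemma pvKeys (es : List (String × String)) :
    (pvD es).keys = PySem.Set.ofList (es.map (fun q => q.1)) := by
  have := PySem.Dict.keys_foldl_modify_key (l := es) (key := fun q : String × String => q.1)
      (d0 := ([] : List String)) (f := fun _ q => (· ++ [q.2])) (d := PySem.Dict.empty)
  simpa [pvD, PySem.Set.update, PySem.Set.ofList_eq_foldl] using this

lemma pvNodupKeys (es : List (String × String)) : (pvD es).keys.Nodup := by
  have := PySem.Dict.nodup_keys_foldl_modify_key (l := es) (key := fun q : String × String => q.1)
      (d0 := ([] : List String)) (f := fun _ q => (· ++ [q.2])) (d := PySem.Dict.empty)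
      (h := by simp)
  simpa [pvD] using this

lemma pvSortedItems (es : List (String × String)) :
    PySem.List.sorted (pvD es).items (fun q => q.1) false
      = (PySem.List.sorted (PySem.Set.ofList (es.map (fun q => q.1))) (fun x => x) false).map
          (fun k => (k, (pvD es).getD k [])) := by
  apply PySem.List.sorted_eq_of_perm_of_pairwise_lt
  · have hitems : (pvD es).items = (pvD es).keys.map (fun k => (k, (pvD es).getD k [])) :=
      PySem.Dict.items_eq_map_keys _ (pvNodupKeys es) []
    rw [hitems, ← pvKeys es]
    exact List.Perm.map _ (PySem.List.sorted_perm _ _ _)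
  · have hp := PySem.List.sorted_ofList_pairwise_lt (xs := es.map (fun q => q.1))
    exact List.Pairwise.map _ (by intro a b h; simpa using h) hp

lemma pvHeadMin (v : List String) (h : String) (t : List String)
    (hs : PySem.List.sorted v (fun x => x) false = h :: t) :
    PySem.List.min? v (fun x => x) = some h := by
  have hne : v ≠ [] := by
    intro hv; rw [hv] at hs; simp [PySem.List.sorted] at hs
  obtain ⟨m, hm⟩ : ∃ m, PySem.List.min? v (fun x => x) = some m := by
    cases hmin : PySem.List.min? v (fun x => x) with
    | none => exact absurd ((PySem.List.min?_eq_none_iff _ _).mp hmin) hne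
    | some m => exact ⟨m, rfl⟩
  clear hne
  have hmem : m ∈ v := PySem.List.min?_mem hm
  have hhead_mem : h ∈ v := by
    have : h ∈ PySem.List.sorted v (fun x => x) false := by rw [hs]; exact List.mem_cons_self
    exact (PySem.List.mem_sorted _ _ _ _).mp this
  have h1 : h ≤ m := PySem.List.key_head_sorted_le _ _ hs m hmem
  have h2 : m ≤ h := PySem.List.min?_isMin hm h hhead_mem
  rw [hm, le_antisymm h1 h2]

lemma pvFold (es : List (String × String)) :
    ∀ (L : List (String × List String)) (acc : List (String × String)),
    (∀ q ∈ L, q.2 = (es.filter (fun r => r.1 == q.1)).map (fun r => r.2) ∧ q.2 ≠ []) →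
    L.foldl pvPick acc
      = acc ++ L.map (fun q =>
          (q.1, (PySem.List.min? ((es.filter (fun r => r.1 == q.1)).map (fun r => r.2)) (fun x => x)).getD "")) := by
  intro L
  induction L with
  | nil => intro acc _; simp
  | cons a t ih =>
    intro acc hq
    obtain ⟨ha1, ha2⟩ := hq a List.mem_cons_self
    cases hsrt : PySem.List.sorted a.2 (fun x => x) false with
    | nil => exact absurd ((PySem.List.sorted_eq_nil_iff _ _ _).mp hsrt) ha2
    | cons h tl =>
      have hmin : PySem.List.min? a.2 (fun x => x) = some h := pvHeadMin _ _ tl hsrt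
      rw [ha1] at hmin
      simp only [List.foldl_cons, pvPick, hsrt]
      rw [ih (acc ++ [(a.1, h)]) (fun q hq' => hq q (List.mem_cons_of_mem a hq'))]
      simp [hmin]

-- ===== VERDICT (by name: the statement is the Claim_ definition above) =====
theorem pick_sample_ids_per_category_spec : Claim_equal_pick_sample_ids_per_category := by
  intro catalogue _
  show pick_sample_ids_per_category catalogue = pick_sample_ids_per_category_alt catalogue
  unfold pick_sample_ids_per_category pick_sample_ids_per_category_alt
  dsimp only
  rw [pvKeyed_eq, pvBuckets_eq]
  set es := pvKept catalogue with hes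
  rw [show es.foldl (fun d q => d.modify q.1 [] (· ++ [q.2])) PySem.Dict.empty = pvD es from rfl]
  rw [pvSortedItems]
  rw [pvFold es _ _ ?_]
  · simp [List.map_map, Function.comp]
  · intro q hq
    obtain ⟨k, hk, rfl⟩ := List.mem_map.mp hq
    refine ⟨pvGrp es k, ?_⟩
    have hkes : k ∈ es.map (fun q => q.1) := by
      simpa [PySem.Set.mem_ofList] using (PySem.List.mem_sorted _ _ _ _).mp hk
    rw [pvGrp es k]
    obtain ⟨q, hq', rfl⟩ := List.mem_map.mp hkes
    intro hnil
    have : q ∈ es.filter (fun r => r.1 == q.1) := List.mem_filter.mpr ⟨hq', by simp⟩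
    rw [List.map_eq_nil_iff] at hnil
    simp [hnil] at this
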